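-- pv_equiv track=rewrite | github.com/priyanshsaxena24/Algo_Visualizer | app.py | quick_sort_with_steps
-- ===== SOURCE A (Python) =====
-- def quick_sort_with_steps(arr):
--     steps = []
--
--     def quick_sort(arr, start, end):
--         if start < end:
--             pivot_index = partition(arr, start, end)
--             steps.append(arr[:])  # Capture current state
--             quick_sort(arr, start, pivot_index - 1)
--             quick_sort(arr, pivot_index + 1, end)
--
--     def partition(arr, start, end):
--         pivot = arr[end]
--         i = start - 1
--         for j in range(start, end):
--             if arr[j] < pivot:
--                 i += 1
--                 arr[i], arr[j] = arr[j], arr[i]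
--         arr[i + 1], arr[end] = arr[end], arr[i + 1]
--         return i + 1
--
--     quick_sort(arr, 0, len(arr) - 1)
--     return arr, steps
-- ===== SOURCE B (Python) =====
-- def quick_sort_with_steps(arr):
--     steps = []
--     stack = [(0, len(arr) - 1)]
--     while stack:
--         start, end = stack.pop()
--         if start >= end:
--             continue
--         pivot = arr[end]
--         i = start
--         for j in range(start, end):
--             if arr[j] < pivot:
--                 arr[i], arr[j] = arr[j], arr[i]
--                 i += 1
--         arr[i], arr[end] = arr[end], arr[i]
--         steps.append(arr[:])
--         stack.append((i + 1, end))
--         stack.append((start, i - 1))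
--     return arr, steps
-- ===== Notes on version B (the rewrite author's own statement) =====
-- stated objective: alternative
-- what changed: The nested recursive quick_sort with a separate partition helper is replaced by a single iterative while-loop over an explicit stack of (start,end) ranges with the partition inlined and rephrased ('next slot' index i starting at start, swap-then-increment, pushing the right range first so snapshots keep A's preorder).
import Mathlib
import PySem

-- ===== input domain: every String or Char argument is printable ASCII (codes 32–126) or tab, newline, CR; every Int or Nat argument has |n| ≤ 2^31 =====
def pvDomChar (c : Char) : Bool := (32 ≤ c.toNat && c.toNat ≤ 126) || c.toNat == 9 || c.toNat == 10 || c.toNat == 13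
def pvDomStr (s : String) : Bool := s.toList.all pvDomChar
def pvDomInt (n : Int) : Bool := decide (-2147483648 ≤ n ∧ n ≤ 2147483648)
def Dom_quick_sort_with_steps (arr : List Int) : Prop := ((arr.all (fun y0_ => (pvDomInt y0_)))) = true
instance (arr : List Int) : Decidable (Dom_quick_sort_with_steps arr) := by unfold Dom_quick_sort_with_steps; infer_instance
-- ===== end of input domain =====

-- ===== PORT A =====
-- B replaces A's nested recursive quick_sort + separate partition helper by one iterative
-- while-loop over an explicit stack with the partition inlined and rephrased (next-slot
-- index, swap-then-increment); alternative decomposition, same cost. Both Pythons sort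
-- `arr` in place and return it: the equivalence proved here is about the returned
-- (array, snapshots) pair. Both recursions are transcribed with a fuel parameter that
-- only makes them total; the wrapper passes fuel that is proved sufficient below.

-- Python's simultaneous swap arr[i], arr[j] = arr[j], arr[i] (indices always in range here)
def pvSwap (l : List Int) (i j : Nat) : List Int :=
  let a := l.getD i 0
  let b := l.getD j 0
  (l.set i b).set j a

-- one iteration of partition's `for j in range(start, end)` loop, state = (arr, i)
def pvPartStep (pivot : Int) (st : List Int × Int) (j : Int) : List Int × Int :=
  if st.1.getD j.toNat 0 < pivot then (pvSwap st.1 (st.2 + 1).toNat j.toNat, st.2 + 1) else st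

-- A's Lomuto partition helper; returns (mutated arr, i + 1)
def pvPartition (arr : List Int) (s e : Int) : List Int × Int :=
  let pivot := arr.getD e.toNat 0
  let res := (PySem.List.pyRange s e 1).foldl (pvPartStep pivot) (arr, s - 1)
  (pvSwap res.1 (res.2 + 1).toNat e.toNat, res.2 + 1)

-- A's inner recursive quick_sort, with the mutated arr and the enclosing `steps` list
-- threaded through as state; fuel is a totality guard (each call strictly shrinks e - s)
def pvQsA : Nat → List Int → Int → Int → List (List Int) → List Int × List (List Int)
  | 0, arr, _, _, steps => (arr, steps)
  | fuel + 1, arr, s, e, steps =>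
    if s < e then
      let pr := pvPartition arr s e
      let r1 := pvQsA fuel pr.1 s (pr.2 - 1) (steps ++ [pr.1])
      pvQsA fuel r1.1 (pr.2 + 1) e r1.2
    else (arr, steps)

def quick_sort_with_steps (arr : List Int) : List Int × List (List Int) :=
  pvQsA (arr.length + 1) arr 0 (arr.length - 1) []

-- ===== PORT B =====
-- B's in-place swap (written as Python evaluates it: both right-hand sides are read
-- from the old list, then both cells are written)
def pvSwapB (l : List Int) (i j : Nat) : List Int :=
  (l.set j (l.getD i 0)).set i (l.getD j 0)

-- B's inlined partition scan `for j in range(start, end): …` as a structural recursion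
-- on the number of remaining indices; i is the next free slot (starts at `start`)
def pvPartLoopB (pivot : Int) : Nat → Int → List Int → Int → List Int × Int
  | 0, _, arr, i => (arr, i)
  | fuel + 1, j, arr, i =>
    if arr.getD j.toNat 0 < pivot then
      pvPartLoopB pivot fuel (j + 1) (pvSwapB arr i.toNat j.toNat) (i + 1)
    else
      pvPartLoopB pivot fuel (j + 1) arr i

-- B's while loop over the explicit stack; Python's `stack.pop()` takes the most recently
-- pushed pair, so the two appends are transcribed as consing (start, i-1) on top of
-- (i+1, end); the `if start >= end: continue` guard is the else branch; fuel is a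
-- totality guard (each iteration strictly shrinks the total weight of the stack)
def pvQsB : Nat → List Int → List (Int × Int) → List (List Int) → List Int × List (List Int)
  | 0, arr, _, steps => (arr, steps)
  | fuel + 1, arr, stack, steps =>
    match stack with
    | [] => (arr, steps)
    | (start, e) :: rest =>
      if start < e then
        let pivot := arr.getD e.toNat 0
        let r := pvPartLoopB pivot (e - start).toNat start arr start
        let arr2 := pvSwapB r.1 r.2.toNat e.toNat
        pvQsB fuel arr2 ((start, r.2 - 1) :: (r.2 + 1, e) :: rest) (steps ++ [arr2])
      else pvQsB fuel arr rest steps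

def quick_sort_with_steps_alt (arr : List Int) : List Int × List (List Int) :=
  pvQsB (2 * arr.length + 1) arr [(0, arr.length - 1)] []

-- ===== PRECONDITION & SPEC =====
def Spec_quick_sort_with_steps (arr : List Int) (out : List Int × List (List Int)) : Prop := out = quick_sort_with_steps_alt arr
instance (arr : List Int) (out : List Int × List (List Int)) : Decidable (Spec_quick_sort_with_steps arr out) := by unfold Spec_quick_sort_with_steps; infer_instance

-- ===== CLAIM (what is proved, stated in full; the proofs are below) =====
def Claim_equal_quick_sort_with_steps : Prop := ∀ (arr : List Int), Dom_quick_sort_with_steps arr → Spec_quick_sort_with_steps arr (quick_sort_with_steps arr)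

-- ===== LEMMAS AND PROOFS =====

-- the fold moves i up by at most one per element
theorem pvPartStep_foldl_bounds (pivot : Int) (l : List Int) :
    ∀ (arr : List Int) (i : Int),
      i ≤ (l.foldl (pvPartStep pivot) (arr, i)).2 ∧
      (l.foldl (pvPartStep pivot) (arr, i)).2 ≤ i + l.length := by
  induction l with
  | nil => intro arr i; simp
  | cons x xs ih =>
    intro arr i
    simp only [List.foldl_cons, List.length_cons]
    have hstep : i ≤ (pvPartStep pivot (arr, i) x).2 ∧ (pvPartStep pivot (arr, i) x).2 ≤ i + 1 := by
      unfold pvPartStep; split <;> simp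
    have h := ih (pvPartStep pivot (arr, i) x).1 (pvPartStep pivot (arr, i) x).2
    rw [Prod.mk.eta] at h
    push_cast
    omega

-- A's pivot index lies in [s, e]
theorem pvPartition_bounds (arr : List Int) (s e : Int) (h : s < e) :
    s ≤ (pvPartition arr s e).2 ∧ (pvPartition arr s e).2 ≤ e := by
  unfold pvPartition
  have hb := pvPartStep_foldl_bounds (arr.getD e.toNat 0) (PySem.List.pyRange s e 1) arr (s - 1)
  have hl : (PySem.List.pyRange s e 1).length = (e - s).toNat :=
    PySem.List.length_pyRange_one s e
  simp only []
  omega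

-- the two swap transcriptions write the same list
theorem pvSwapB_eq (l : List Int) (i j : Nat) : pvSwapB l i j = pvSwap l i j := by
  unfold pvSwap pvSwapB
  by_cases hij : i = j
  · subst hij; simp
  · exact List.set_comm _ _ (Ne.symm hij)

-- B's inlined scan computes A's partition fold, with B's slot index i one ahead of A's i
theorem pvPartLoopB_eq (pivot e : Int) :
    ∀ (fuel : Nat) (j : Int), fuel = (e - j).toNat →
      ∀ (arr : List Int) (i : Int),
        pvPartLoopB pivot fuel j arr i =
          (((PySem.List.pyRange j e 1).foldl (pvPartStep pivot) (arr, i - 1)).1,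
           ((PySem.List.pyRange j e 1).foldl (pvPartStep pivot) (arr, i - 1)).2 + 1) := by
  intro fuel
  induction fuel with
  | zero =>
    intro j hf arr i
    have hje : e ≤ j := by omega
    have : PySem.List.pyRange j e 1 = [] := by
      rw [PySem.List.pyRange_one]
      have : (e - j).toNat = 0 := by omega
      simp [this]
    simp [pvPartLoopB, this]
  | succ n ih =>
    intro j hf arr i
    have hje : j < e := by omega
    rw [PySem.List.pyRange_one_cons hje]
    rw [pvPartLoopB]
    simp only [List.foldl_cons]
    have hstep : pvPartStep pivot (arr, i - 1) j =
        if arr.getD j.toNat 0 < pivot then (pvSwap arr i.toNat j.toNat, i) else (arr, i - 1) := by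
      unfold pvPartStep
      simp only []
      split <;> simp_all [show i - 1 + 1 = i by omega]
    rw [hstep]
    split
    · rw [ih (j + 1) (by omega) (pvSwapB arr i.toNat j.toNat) (i + 1), pvSwapB_eq]
      simp [show i + 1 - 1 = i by omega]
    · rw [ih (j + 1) (by omega) arr i]

-- hence B's inlined partition is exactly A's pvPartition (array and pivot index alike)
theorem pvPartitionB_eq (arr : List Int) (s e : Int) :
    (pvSwapB (pvPartLoopB (arr.getD e.toNat 0) (e - s).toNat s arr s).1
       (pvPartLoopB (arr.getD e.toNat 0) (e - s).toNat s arr s).2.toNat e.toNat,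
     (pvPartLoopB (arr.getD e.toNat 0) (e - s).toNat s arr s).2) = pvPartition arr s e := by
  rw [pvPartLoopB_eq (arr.getD e.toNat 0) e (e - s).toNat s rfl arr s]
  unfold pvPartition
  rw [pvSwapB_eq]

-- weight of a stack: bounds the number of remaining loop iterations
def pvM (stack : List (Int × Int)) : Nat :=
  (stack.map (fun q => 2 * (q.2 - q.1 + 1).toNat + 1)).sum

theorem pvM_pos (p : Int × Int) (rest : List (Int × Int)) : 1 ≤ pvM (p :: rest) := by
  simp [pvM]; omega

theorem pvM_step (start e p : Int) (rest : List (Int × Int))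
    (h : start < e) (h1 : start ≤ p) (h2 : p ≤ e) :
    pvM ((start, p - 1) :: (p + 1, e) :: rest) + 1 = pvM ((start, e) :: rest) := by
  simp [pvM]; omega

theorem pvQsB_nil (f : Nat) (arr : List Int) (steps : List (List Int)) :
    pvQsB f arr [] steps = (arr, steps) := by
  cases f <;> rfl

-- fuel irrelevance for A's recursion: any fuel above the range length gives the same result
theorem pvQsA_fuel : ∀ (f1 : Nat) (s e : Int) (arr : List Int) (steps : List (List Int)),
    (e - s).toNat < f1 → ∀ (f2 : Nat), (e - s).toNat < f2 →
    pvQsA f1 arr s e steps = pvQsA f2 arr s e steps := by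
  intro f1
  induction f1 with
  | zero => intro s e arr steps h; omega
  | succ n ih =>
    intro s e arr steps h f2 h2
    obtain ⟨m, rfl⟩ : ∃ m, f2 = m + 1 := ⟨f2 - 1, by omega⟩
    by_cases hse : s < e
    · have hp := pvPartition_bounds arr s e hse
      rw [pvQsA, pvQsA]
      simp only [hse, if_true]
      have hL1 : ((pvPartition arr s e).2 - 1 - s).toNat < n := by omega
      have hL2 : ((pvPartition arr s e).2 - 1 - s).toNat < m := by omega
      have hR1 : (e - ((pvPartition arr s e).2 + 1)).toNat < n := by omega
      have hR2 : (e - ((pvPartition arr s e).2 + 1)).toNat < m := by omega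
      rw [← ih s ((pvPartition arr s e).2 - 1) (pvPartition arr s e).1 _ hL1 m hL2]
      exact ih ((pvPartition arr s e).2 + 1) e _ _ hR1 m hR2
    · rw [pvQsA, pvQsA]
      simp [hse]

-- fuel irrelevance for B's loop: any fuel above the stack weight gives the same result
theorem pvQsB_fuel : ∀ (f1 : Nat) (stack : List (Int × Int)) (arr : List Int)
    (steps : List (List Int)), pvM stack ≤ f1 → ∀ (f2 : Nat), pvM stack ≤ f2 →
    pvQsB f1 arr stack steps = pvQsB f2 arr stack steps := by
  intro f1
  induction f1 with
  | zero =>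
    intro stack arr steps h f2 _
    match stack with
    | [] => rw [pvQsB_nil, pvQsB_nil]
    | p :: rest => exact absurd h (by have := pvM_pos p rest; omega)
  | succ n ih =>
    intro stack arr steps h f2 h2
    match stack with
    | [] => rw [pvQsB_nil, pvQsB_nil]
    | (start, e) :: rest =>
      have h1 := pvM_pos (start, e) rest
      obtain ⟨m, rfl⟩ : ∃ m, f2 = m + 1 := ⟨f2 - 1, by omega⟩
      rw [pvQsB, pvQsB]
      by_cases hse : start < e
      · simp only [hse, if_true]
        have heq := pvPartitionB_eq arr start e
        have hA := congrArg Prod.fst heq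
        have hI := congrArg Prod.snd heq
        simp only [] at hA hI
        rw [hA, hI]
        have hp := pvPartition_bounds arr start e hse
        have hm := pvM_step start e (pvPartition arr start e).2 rest hse hp.1 hp.2
        exact ih _ _ _ (by omega) m (by omega)
      · simp only [hse, if_false]
        have hrest : pvM rest ≤ pvM ((start, e) :: rest) - 1 := by
          simp [pvM]
        exact ih rest arr steps (by omega) m (by omega)

-- the stack machine simulates the recursion: processing (s, e) from the top of the stack
-- produces exactly the recursive call's result, then continues with the rest of the stack
theorem pvQsB_simulates : ∀ (n : Nat) (s e : Int), (e - s).toNat ≤ n →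
    ∀ (arr : List Int) (stack : List (Int × Int)) (steps : List (List Int)) (f : Nat),
      pvM ((s, e) :: stack) ≤ f →
      pvQsB f arr ((s, e) :: stack) steps =
        pvQsB (pvM stack) (pvQsA ((e - s).toNat + 1) arr s e steps).1 stack
          (pvQsA ((e - s).toNat + 1) arr s e steps).2 := by
  intro n
  induction n with
  | zero =>
    intro s e hn arr stack steps f hf
    have hse : ¬ s < e := by omega
    have h1 := pvM_pos (s, e) stack
    obtain ⟨g, rfl⟩ : ∃ g, f = g + 1 := ⟨f - 1, by omega⟩
    rw [pvQsB]
    simp only [hse, if_false]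
    rw [show (e - s).toNat + 1 = 0 + 1 from by omega, pvQsA]
    simp only [hse, if_false]
    have hsum : pvM ((s, e) :: stack) = 2 * (e - s + 1).toNat + 1 + pvM stack := by
      simp [pvM]
    exact pvQsB_fuel g stack arr steps (by omega) (pvM stack) le_rfl
  | succ n ih =>
    intro s e hn arr stack steps f hf
    by_cases hse : s < e
    · have h1 := pvM_pos (s, e) stack
      obtain ⟨g, rfl⟩ : ∃ g, f = g + 1 := ⟨f - 1, by omega⟩
      rw [pvQsB]
      simp only [hse, if_true]
      have heq := pvPartitionB_eq arr s e
      have hA := congrArg Prod.fst heq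
      have hI := congrArg Prod.snd heq
      simp only [] at hA hI
      rw [hA, hI]
      have hp := pvPartition_bounds arr s e hse
      have hm := pvM_step s e (pvPartition arr s e).2 stack hse hp.1 hp.2
      rw [ih s ((pvPartition arr s e).2 - 1) (by omega) _ _ _ g (by omega)]
      rw [ih ((pvPartition arr s e).2 + 1) e (by omega) _ _ _ _ le_rfl]
      have hRHS : pvQsA ((e - s).toNat + 1) arr s e steps =
          pvQsA ((e - ((pvPartition arr s e).2 + 1)).toNat + 1)
            (pvQsA (((pvPartition arr s e).2 - 1 - s).toNat + 1) (pvPartition arr s e).1 s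
              ((pvPartition arr s e).2 - 1) (steps ++ [(pvPartition arr s e).1])).1
            ((pvPartition arr s e).2 + 1) e
            (pvQsA (((pvPartition arr s e).2 - 1 - s).toNat + 1) (pvPartition arr s e).1 s
              ((pvPartition arr s e).2 - 1) (steps ++ [(pvPartition arr s e).1])).2 := by
        conv_lhs => rw [pvQsA]
        simp only [hse, if_true]
        rw [pvQsA_fuel ((e - s).toNat) s ((pvPartition arr s e).2 - 1) (pvPartition arr s e).1
              (steps ++ [(pvPartition arr s e).1]) (by omega)
              (((pvPartition arr s e).2 - 1 - s).toNat + 1) (by omega)]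
        rw [pvQsA_fuel ((e - s).toNat) ((pvPartition arr s e).2 + 1) e _ _ (by omega)
              ((e - ((pvPartition arr s e).2 + 1)).toNat + 1) (by omega)]
      rw [hRHS]
    · -- same shape as the base case
      have h1 := pvM_pos (s, e) stack
      obtain ⟨g, rfl⟩ : ∃ g, f = g + 1 := ⟨f - 1, by omega⟩
      rw [pvQsB]
      simp only [hse, if_false]
      rw [show (e - s).toNat + 1 = 0 + 1 from by omega, pvQsA]
      simp only [hse, if_false]
      have hsum : pvM ((s, e) :: stack) = 2 * (e - s + 1).toNat + 1 + pvM stack := by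
        simp [pvM]
      exact pvQsB_fuel g stack arr steps (by omega) (pvM stack) le_rfl

-- ===== VERDICT (by name: the statement is the Claim_ definition above) =====
theorem quick_sort_with_steps_spec : Claim_equal_quick_sort_with_steps := by
  unfold Claim_equal_quick_sort_with_steps
  intro arr _
  unfold Spec_quick_sort_with_steps quick_sort_with_steps quick_sort_with_steps_alt
  have hM : pvM [((0 : Int), (arr.length : Int) - 1)] = 2 * arr.length + 1 := by
    simp [pvM]
  rw [pvQsB_simulates (((arr.length : Int) - 1) - 0).toNat 0 ((arr.length : Int) - 1) le_rfl
        arr [] [] (2 * arr.length + 1) hM.le]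
  rw [pvQsB_nil]
  rw [pvQsA_fuel ((((arr.length : Int) - 1) - 0).toNat + 1) 0 ((arr.length : Int) - 1)
        arr [] (by omega) (arr.length + 1) (by omega)]
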